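-- pv_equiv track=rewrite | github.com/TheAlgorithms/Python | project_euler/problem_071/sol1.py | solution
-- ===== SOURCE A (Python) =====
-- def solution(numerator: int = 3, denominator: int = 7, limit: int = 1000000) -> int:
--     """
--     Returns the closest numerator of the fraction immediately to the
--     left of given fraction (numerator/denominator) from a list of reduced
--     proper fractions.
--     >>> solution()
--     428570
--     >>> solution(3, 7, 8)
--     2
--     >>> solution(6, 7, 60)
--     47
--     """
--     max_numerator = 0
--     max_denominator = 1
--
--     for current_denominator in range(1, limit + 1):
--         current_numerator = current_denominator * numerator // denominator
--         if current_denominator % denominator == 0: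
--             current_numerator -= 1
--         if current_numerator * max_denominator > current_denominator * max_numerator:
--             max_numerator = current_numerator
--             max_denominator = current_denominator
--     return max_numerator
-- ===== SOURCE B (Python) =====
-- def solution(numerator: int = 3, denominator: int = 7, limit: int = 1000000) -> int:
--     """The candidate fractions repeat with period m = |denominator| and, within a
--     residue class, improve as the denominator grows.  So instead of scanning all
--     denominators: (1) if the target fraction itself is reachable (non-reduced
--     input with reduced denominator <= limit) answer directly; otherwise (2) scan
--     only the last m candidate denominators, downward, and reduce the winner."""
--     if limit < 1:
--         return 0
--
--     def gcd(x, y):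
--         while y:
--             x, y = y, x % y
--         return abs(x)
--
--     m = abs(denominator)
--     g = gcd(numerator, m)
--     mp = m // g
--     if g > 1 and mp <= limit:
--         val = mp * numerator // denominator
--         return val if val > 0 else 0
--     best_num, best_den = 0, 1
--     lo = limit - m + 1
--     if lo < 1:
--         lo = 1
--     for d in range(limit, lo - 1, -1):
--         c = d * numerator // denominator
--         if d % denominator == 0:
--             c -= 1
--         if c * best_den >= best_num * d:
--             best_num, best_den = c, d
--     if best_num <= 0:
--         return 0
--     return best_num // gcd(best_num, best_den)
-- ===== Notes on version B (the rewrite author's own statement) =====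
-- stated objective: alternative
-- what changed: B exploits that the candidate fractions are periodic in the denominator with period m=|denominator| and improve within each residue class: it answers the exact-hit case (non-reduced input whose reduced denominator fits under the limit) by a direct division, and otherwise scans only the last m candidate denominators (downward, keeping ties) and reduces the winner by gcd, instead of A's scan of every denominator up to the limit.
import Mathlib
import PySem

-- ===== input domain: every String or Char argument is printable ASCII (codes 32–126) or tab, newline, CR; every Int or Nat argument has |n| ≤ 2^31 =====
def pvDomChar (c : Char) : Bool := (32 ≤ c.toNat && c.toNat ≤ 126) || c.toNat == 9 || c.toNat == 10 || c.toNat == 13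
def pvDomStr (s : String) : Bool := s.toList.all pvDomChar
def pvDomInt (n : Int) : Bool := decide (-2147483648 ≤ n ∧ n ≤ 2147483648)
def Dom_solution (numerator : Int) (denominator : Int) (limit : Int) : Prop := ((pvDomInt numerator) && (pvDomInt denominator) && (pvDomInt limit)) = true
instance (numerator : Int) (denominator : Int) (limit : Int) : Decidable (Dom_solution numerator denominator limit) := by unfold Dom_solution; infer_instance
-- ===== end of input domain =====

set_option maxHeartbeats 1000000

-- B replaces A's scan of every denominator up to the limit by an exact-hit test plus
-- a downward scan of only the last |denominator| candidate denominators (the fractions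
-- are periodic in the denominator and improve within a residue class), reducing the
-- winner by gcd.

-- ===== PORT A =====
-- candidate numerator for a given current_denominator (identical lines in both Pythons)
def pvCand (numerator : Int) (denominator : Int) (d : Int) : Int :=
  let c0 := PySem.Int.floordiv (d * numerator) denominator
  if PySem.Int.mod d denominator = 0 then c0 - 1 else c0

def solution (numerator : Int) (denominator : Int) (limit : Int) : Int :=
  ((PySem.List.pyRange 1 (limit + 1) 1).foldl
    (fun (s : Int × Int) d =>
      let c := pvCand numerator denominator d
      if c * s.2 > d * s.1 then (c, d) else s) (0, 1)).1

-- ===== PORT B =====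
-- termination bound for the Euclid loop of Source B's gcd (cited by pvGcd's decreasing_by)
theorem pvModAbsLt (x y : Int) (hy : ¬ y = 0) :
    (PySem.Int.mod x y).natAbs < y.natAbs := by
  rcases lt_or_gt_of_ne hy with h | h
  · have := PySem.Int.mod_neg_bounds x h
    omega
  · have h1 := PySem.Int.mod_nonneg x h
    have h2 := PySem.Int.mod_lt x h
    omega

-- Source B's hand-written Euclid gcd: while y: x, y = y, x % y; return abs(x)
def pvGcd (x y : Int) : Int :=
  if h : y = 0 then |x| else pvGcd y (PySem.Int.mod x y)
termination_by y.natAbs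
decreasing_by exact pvModAbsLt x y h

def solution_alt (numerator : Int) (denominator : Int) (limit : Int) : Int :=
  if limit < 1 then 0
  else
    let m := |denominator|
    let g := pvGcd numerator m
    let mp := PySem.Int.floordiv m g
    if 1 < g ∧ mp ≤ limit then
      let val := PySem.Int.floordiv (mp * numerator) denominator
      if 0 < val then val else 0
    else
      let lo := if limit - m + 1 < 1 then 1 else limit - m + 1
      let s := (PySem.List.pyRange limit (lo - 1) (-1)).foldl
        (fun (s : Int × Int) d =>
          let c := pvCand numerator denominator d
          if c * s.2 ≥ s.1 * d then (c, d) else s) (0, 1)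
      if s.1 ≤ 0 then 0 else PySem.Int.floordiv s.1 (pvGcd s.1 s.2)

-- ===== PRECONDITION & SPEC =====
-- Pre_ excludes only the inputs where Python A raises ZeroDivisionError: denominator = 0 with limit ≥ 1.
def Pre_solution (numerator : Int) (denominator : Int) (limit : Int) : Prop :=
  denominator ≠ 0 ∨ limit < 1
instance (numerator : Int) (denominator : Int) (limit : Int) : Decidable (Pre_solution numerator denominator limit) := by unfold Pre_solution; infer_instance
def pvWitness_solution : Int × Int × Int := (3, 7, 8)

def Spec_solution (numerator : Int) (denominator : Int) (limit : Int) (out : Int) : Prop := out = solution_alt numerator denominator limit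
instance (numerator : Int) (denominator : Int) (limit : Int) (out : Int) : Decidable (Spec_solution numerator denominator limit out) := by unfold Spec_solution; infer_instance

-- ===== CLAIM (what is proved, stated in full; the proofs are below) =====
def Claim_equal_solution : Prop := ∀ (numerator : Int) (denominator : Int) (limit : Int), Dom_solution numerator denominator limit → Pre_solution numerator denominator limit → Spec_solution numerator denominator limit (solution numerator denominator limit)

-- ===== LEMMAS AND PROOFS =====

-- A's loop shape, abstracted over the candidate function
def pvUp (v : Int → Int) (l : List Int) (s : Int × Int) : Int × Int :=
  l.foldl (fun s d => if v d * s.2 > d * s.1 then (v d, d) else s) s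

-- first element of l attaining the maximum of the fraction v d / d
def pvFM (v : Int → Int) : List Int → Option Int
  | [] => none
  | d :: t => match pvFM v t with
    | none => some d
    | some m => if v m * d > v d * m then some m else some d

-- what A's loop ends at, given the first maximum
def pvPickUp (v : Int → Int) (s : Int × Int) : Option Int → Int × Int
  | none => s
  | some m => if v m * s.2 > m * s.1 then (v m, m) else s

theorem pvFM_cons_none {v : Int → Int} {t : List Int} (d : Int) (h : pvFM v t = none) :
    pvFM v (d :: t) = some d := by simp [pvFM, h]

theorem pvFM_cons_some {v : Int → Int} {t : List Int} (d : Int) {m : Int} (h : pvFM v t = some m) :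
    pvFM v (d :: t) = (if v m * d > v d * m then some m else some d) := by simp [pvFM, h]

theorem pvFM_mem {v : Int → Int} : ∀ {l : List Int} {m : Int}, pvFM v l = some m → m ∈ l := by
  intro l
  induction l with
  | nil => intro m h; simp [pvFM] at h
  | cons d t ih =>
    intro m h
    cases hfm : pvFM v t with
    | none => rw [pvFM_cons_none d hfm] at h; cases h; simp
    | some m' =>
      rw [pvFM_cons_some d hfm] at h
      by_cases hc : v m' * d > v d * m'
      · rw [if_pos hc] at h; cases h; exact List.mem_cons_of_mem _ (ih hfm)
      · rw [if_neg hc] at h; cases h; simp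

theorem pvFM_isSome {v : Int → Int} (d : Int) (t : List Int) :
    ∃ z, pvFM v (d :: t) = some z := by
  cases hfm : pvFM v t with
  | none => exact ⟨d, pvFM_cons_none d hfm⟩
  | some m =>
    by_cases hc : v m * d > v d * m
    · exact ⟨m, by rw [pvFM_cons_some d hfm, if_pos hc]⟩
    · exact ⟨d, by rw [pvFM_cons_some d hfm, if_neg hc]⟩

-- fraction-order transitivity with positive denominators
theorem pvfrac_le_le {c1 d1 c2 d2 c3 d3 : Int} (h1 : 0 < d1) (h2 : 0 < d2) (h3 : 0 < d3)
    (ha : c1 * d2 ≤ c2 * d1) (hb : c2 * d3 ≤ c3 * d2) : c1 * d3 ≤ c3 * d1 := by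
  nlinarith
theorem pvfrac_lt_le {c1 d1 c2 d2 c3 d3 : Int} (h1 : 0 < d1) (h2 : 0 < d2) (h3 : 0 < d3)
    (ha : c1 * d2 < c2 * d1) (hb : c2 * d3 ≤ c3 * d2) : c1 * d3 < c3 * d1 := by
  nlinarith

-- A's loop keeps the FIRST element attaining the maximal fraction (strict improvement only)
theorem pvUp_char (v : Int → Int) : ∀ (l : List Int) (s : Int × Int),
    (∀ d ∈ l, 0 < d) → 0 < s.2 →
    pvUp v l s = pvPickUp v s (pvFM v l) := by
  intro l
  induction l with
  | nil => intro s _ _; simp [pvUp, pvFM, pvPickUp]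
  | cons d t ih =>
    intro s hpos hs
    have hd : 0 < d := hpos d (by simp)
    have hpt : ∀ x ∈ t, 0 < x := fun x hx => hpos x (List.mem_cons_of_mem _ hx)
    have hstep : pvUp v (d :: t) s = pvUp v t (if v d * s.2 > d * s.1 then (v d, d) else s) := rfl
    rw [hstep]
    by_cases h1 : v d * s.2 > d * s.1
    · rw [if_pos h1, ih (v d, d) hpt hd]
      cases hfm : pvFM v t with
      | none =>
        rw [pvFM_cons_none d hfm]
        simp only [pvPickUp]
        rw [if_pos (show v d * s.2 > d * s.1 from h1)]
      | some m =>
        have hm : 0 < m := hpt m (pvFM_mem hfm)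
        rw [pvFM_cons_some d hfm]
        by_cases h2 : v m * d > v d * m
        · rw [if_pos h2]
          have hchain : v m * s.2 > m * s.1 := by
            have := pvfrac_lt_le (c1 := s.1) (d1 := s.2) (c2 := v d) (d2 := d)
              (c3 := v m) (d3 := m) hs hd hm (by linarith) (by linarith)
            linarith
          simp only [pvPickUp]
          rw [if_pos (show v m * d > m * v d by linarith [mul_comm m (v d)]), if_pos hchain]
        · rw [if_neg h2]
          simp only [pvPickUp]
          rw [if_neg (show ¬ v m * d > m * v d by rw [mul_comm m (v d)]; exact h2),
              if_pos (show v d * s.2 > d * s.1 from h1)]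
    · rw [if_neg h1, ih s hpt hs]
      cases hfm : pvFM v t with
      | none =>
        rw [pvFM_cons_none d hfm]
        simp only [pvPickUp]
        rw [if_neg (show ¬ v d * s.2 > d * s.1 from h1)]
      | some m =>
        have hm : 0 < m := hpt m (pvFM_mem hfm)
        rw [pvFM_cons_some d hfm]
        by_cases h2 : v m * d > v d * m
        · rw [if_pos h2]
        · rw [if_neg h2]
          have hchain : ¬ v m * s.2 > m * s.1 := by
            have := pvfrac_le_le (c1 := v m) (d1 := m) (c2 := v d) (d2 := d)
              (c3 := s.1) (d3 := s.2) hm hd hs (by linarith) (by linarith)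
            linarith
          simp only [pvPickUp]
          rw [if_neg hchain, if_neg (show ¬ v d * s.2 > d * s.1 from h1)]

-- the first maximum splits the list: strictly worse before, no better after
theorem pvFM_split (v : Int → Int) : ∀ (l : List Int), (∀ x ∈ l, 0 < x) → ∀ {z : Int},
    pvFM v l = some z →
    ∃ l1 l2, l = l1 ++ z :: l2 ∧ (∀ x ∈ l1, v x * z < v z * x) ∧ (∀ x ∈ l2, v x * z ≤ v z * x) := by
  intro l
  induction l with
  | nil => intro _ z h; simp [pvFM] at h
  | cons d t ih =>
    intro hpos z h
    have hd : 0 < d := hpos d (by simp)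
    have hpt : ∀ x ∈ t, 0 < x := fun x hx => hpos x (List.mem_cons_of_mem _ hx)
    cases hfm : pvFM v t with
    | none =>
      rw [pvFM_cons_none d hfm] at h
      cases h
      have ht : t = [] := by
        cases t with
        | nil => rfl
        | cons y u => obtain ⟨w, hw⟩ := pvFM_isSome (v := v) y u; rw [hw] at hfm; cases hfm
      subst ht
      exact ⟨[], [], rfl, by simp, by simp⟩
    | some m =>
      have hm : 0 < m := hpt m (pvFM_mem hfm)
      obtain ⟨t1, t2, hteq, hstrict, hle⟩ := ih hpt hfm
      rw [pvFM_cons_some d hfm] at h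
      by_cases hc : v m * d > v d * m
      · rw [if_pos hc] at h
        cases h
        refine ⟨d :: t1, t2, by rw [hteq]; rfl, ?_, hle⟩
        intro x hx
        rcases List.mem_cons.mp hx with hx | hx
        · subst hx; linarith
        · exact hstrict x hx
      · rw [if_neg hc] at h
        cases h
        refine ⟨[], t, rfl, by simp, ?_⟩
        intro x hx
        have hx0 : 0 < x := hpt x hx
        have hmd : v m * d ≤ v d * m := by linarith
        rw [hteq] at hx
        rcases List.mem_append.mp hx with hx | hx
        · have := hstrict x hx
          have := pvfrac_lt_le (c1 := v x) (d1 := x) (c2 := v m) (d2 := m)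
            (c3 := v d) (d3 := d) hx0 hm hd (by linarith) hmd
          linarith
        · rcases List.mem_cons.mp hx with hx | hx
          · subst hx; exact hmd
          · have := hle x hx
            exact pvfrac_le_le (c1 := v x) (d1 := x) (c2 := v m) (d2 := m)
              (c3 := v d) (d3 := d) hx0 hm hd (by linarith) hmd

-- B's window loop shape (descending scan, update on ≥), abstracted
def pvDn (v : Int → Int) (l : List Int) (s : Int × Int) : Int × Int :=
  l.foldl (fun s d => if v d * s.2 ≥ s.1 * d then (v d, d) else s) s

-- last element of l attaining the maximum of the fraction v d / d
def pvLM (v : Int → Int) : List Int → Option Int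
  | [] => none
  | d :: t => match pvLM v t with
    | none => some d
    | some m => if v m * d ≥ v d * m then some m else some d

-- what B's loop ends at, given the last maximum
def pvPickDn (v : Int → Int) (s : Int × Int) : Option Int → Int × Int
  | none => s
  | some m => if v m * s.2 ≥ s.1 * m then (v m, m) else s

theorem pvLM_cons_none {v : Int → Int} {t : List Int} (d : Int) (h : pvLM v t = none) :
    pvLM v (d :: t) = some d := by simp [pvLM, h]

theorem pvLM_cons_some {v : Int → Int} {t : List Int} (d : Int) {m : Int} (h : pvLM v t = some m) :
    pvLM v (d :: t) = (if v m * d ≥ v d * m then some m else some d) := by simp [pvLM, h]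

theorem pvLM_mem {v : Int → Int} : ∀ {l : List Int} {m : Int}, pvLM v l = some m → m ∈ l := by
  intro l
  induction l with
  | nil => intro m h; simp [pvLM] at h
  | cons d t ih =>
    intro m h
    cases hlm : pvLM v t with
    | none => rw [pvLM_cons_none d hlm] at h; cases h; simp
    | some m' =>
      rw [pvLM_cons_some d hlm] at h
      by_cases hc : v m' * d ≥ v d * m'
      · rw [if_pos hc] at h; cases h; exact List.mem_cons_of_mem _ (ih hlm)
      · rw [if_neg hc] at h; cases h; simp

theorem pvLM_isSome {v : Int → Int} (d : Int) (t : List Int) :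
    ∃ z, pvLM v (d :: t) = some z := by
  cases hlm : pvLM v t with
  | none => exact ⟨d, pvLM_cons_none d hlm⟩
  | some m =>
    by_cases hc : v m * d ≥ v d * m
    · exact ⟨m, by rw [pvLM_cons_some d hlm, if_pos hc]⟩
    · exact ⟨d, by rw [pvLM_cons_some d hlm, if_neg hc]⟩

-- B's loop keeps the LAST element attaining the maximal fraction (update on ties too)
theorem pvDn_char (v : Int → Int) : ∀ (l : List Int) (s : Int × Int),
    (∀ d ∈ l, 0 < d) → 0 < s.2 →
    pvDn v l s = pvPickDn v s (pvLM v l) := by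
  intro l
  induction l with
  | nil => intro s _ _; simp [pvDn, pvLM, pvPickDn]
  | cons d t ih =>
    intro s hpos hs
    have hd : 0 < d := hpos d (by simp)
    have hpt : ∀ x ∈ t, 0 < x := fun x hx => hpos x (List.mem_cons_of_mem _ hx)
    have hstep : pvDn v (d :: t) s = pvDn v t (if v d * s.2 ≥ s.1 * d then (v d, d) else s) := rfl
    rw [hstep]
    by_cases h1 : v d * s.2 ≥ s.1 * d
    · rw [if_pos h1, ih (v d, d) hpt hd]
      cases hlm : pvLM v t with
      | none =>
        rw [pvLM_cons_none d hlm]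
        simp only [pvPickDn]
        rw [if_pos (show v d * s.2 ≥ s.1 * d from h1)]
      | some m =>
        have hm : 0 < m := hpt m (pvLM_mem hlm)
        rw [pvLM_cons_some d hlm]
        by_cases h2 : v m * d ≥ v d * m
        · rw [if_pos h2]
          have hchain : v m * s.2 ≥ s.1 * m := by
            have := pvfrac_le_le (c1 := s.1) (d1 := s.2) (c2 := v d) (d2 := d)
              (c3 := v m) (d3 := m) hs hd hm (by linarith) (by linarith)
            linarith
          simp only [pvPickDn]
          rw [if_pos (show v m * d ≥ v d * m from h2), if_pos hchain]
        · rw [if_neg h2]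
          simp only [pvPickDn]
          rw [if_neg (show ¬ v m * d ≥ v d * m from h2),
              if_pos (show v d * s.2 ≥ s.1 * d from h1)]
    · rw [if_neg h1, ih s hpt hs]
      cases hlm : pvLM v t with
      | none =>
        rw [pvLM_cons_none d hlm]
        simp only [pvPickDn]
        rw [if_neg (show ¬ v d * s.2 ≥ s.1 * d from h1)]
      | some m =>
        have hm : 0 < m := hpt m (pvLM_mem hlm)
        rw [pvLM_cons_some d hlm]
        by_cases h2 : v m * d ≥ v d * m
        · rw [if_pos h2]
        · rw [if_neg h2]
          have hchain : ¬ v m * s.2 ≥ s.1 * m := by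
            have := pvfrac_lt_le (c1 := v m) (d1 := m) (c2 := v d) (d2 := d)
              (c3 := s.1) (d3 := s.2) hm hd hs (by linarith) (by linarith)
            linarith
          simp only [pvPickDn]
          rw [if_neg hchain, if_neg (show ¬ v d * s.2 ≥ s.1 * d from h1)]

-- the last maximum really is a maximum
theorem pvLM_max (v : Int → Int) : ∀ (l : List Int), (∀ x ∈ l, 0 < x) → ∀ {m : Int},
    pvLM v l = some m → ∀ x ∈ l, v x * m ≤ v m * x := by
  intro l
  induction l with
  | nil => intro _ m h; simp [pvLM] at h
  | cons d t ih =>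
    intro hpos m hm x hx
    have hd : 0 < d := hpos d (by simp)
    have hpt : ∀ y ∈ t, 0 < y := fun y hy => hpos y (List.mem_cons_of_mem _ hy)
    cases hlm : pvLM v t with
    | none =>
      rw [pvLM_cons_none d hlm] at hm
      cases hm
      have ht : t = [] := by
        cases t with
        | nil => rfl
        | cons y u => obtain ⟨w, hw⟩ := pvLM_isSome (v := v) y u; rw [hw] at hlm; cases hlm
      subst ht
      rcases List.mem_cons.mp hx with hx | hx
      · subst hx; exact le_rfl
      · simp at hx
    | some m' =>
      have hm' : 0 < m' := hpt m' (pvLM_mem hlm)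
      rw [pvLM_cons_some d hlm] at hm
      by_cases hc : v m' * d ≥ v d * m'
      · rw [if_pos hc] at hm
        cases hm
        rcases List.mem_cons.mp hx with hx | hx
        · subst hx; linarith
        · exact ih hpt hlm x hx
      · rw [if_neg hc] at hm
        cases hm
        rcases List.mem_cons.mp hx with hx | hx
        · subst hx; exact le_rfl
        · have hx0 : 0 < x := hpt x hx
          have h1 := ih hpt hlm x hx
          exact pvfrac_le_le (c1 := v x) (d1 := x) (c2 := v m') (d2 := m')
            (c3 := v d) (d3 := d) hx0 hm' hd h1 (by linarith)

-- scaled gap of the candidate fraction below numerator/denominator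
def pvW (a b d : Int) : Int := d * a - b * pvCand a b d

theorem pvW_eq (a b d : Int) :
    pvW a b d = PySem.Int.mod (d * a) b + (if PySem.Int.mod d b = 0 then b else 0) := by
  have h := PySem.Int.floordiv_mul_add_mod (d * a) b
  unfold pvW pvCand
  split_ifs <;> simp only [] <;> nlinarith [h]

theorem pvW_nonneg {a b : Int} (hb : 0 < b) (d : Int) : 0 ≤ pvW a b d := by
  rw [pvW_eq]
  have := PySem.Int.mod_nonneg (d * a) hb
  split_ifs <;> linarith

theorem pvW_zero_iff {a b : Int} (hb : 0 < b) (d : Int) :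
    pvW a b d = 0 ↔ (¬ b ∣ d ∧ b ∣ d * a) := by
  rw [pvW_eq]
  have h0 := PySem.Int.mod_nonneg (d * a) hb
  by_cases hd : b ∣ d
  · rw [if_pos ((PySem.Int.mod_eq_zero_iff_dvd d b).mpr hd)]
    constructor
    · intro h; exfalso; linarith
    · intro h; exact absurd hd h.1
  · rw [if_neg (fun h => hd ((PySem.Int.mod_eq_zero_iff_dvd d b).mp h)), add_zero,
        PySem.Int.mod_eq_zero_iff_dvd]
    exact ⟨fun h => ⟨hd, h⟩, fun h => h.2⟩

theorem pvCross (a b d e : Int) :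
    b * (pvCand a b e * d - pvCand a b d * e) = pvW a b d * e - pvW a b e * d := by
  unfold pvW; ring

theorem pvTransfer_lt {a b : Int} (hb : 0 < b) (d e : Int) :
    (pvCand a b e * d > pvCand a b d * e) ↔ (pvW a b d * e > pvW a b e * d) := by
  have h := pvCross a b d e
  constructor <;> intro hx <;> nlinarith

theorem pvTransfer_le {a b : Int} (hb : 0 < b) (d e : Int) :
    (pvCand a b e * d ≥ pvCand a b d * e) ↔ (pvW a b d * e ≥ pvW a b e * d) := by
  have h := pvCross a b d e
  constructor <;> intro hx <;> nlinarith

theorem pvCand_add {a b : Int} (hb : 0 < b) (d : Int) :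
    pvCand a b (d + b) = pvCand a b d + a := by
  have hfd : PySem.Int.floordiv ((d + b) * a) b = PySem.Int.floordiv (d * a) b + a := by
    rw [PySem.Int.floordiv_eq_ediv_of_pos hb, PySem.Int.floordiv_eq_ediv_of_pos hb,
        show (d + b) * a = d * a + a * b by ring, Int.add_mul_ediv_right _ _ (by omega : b ≠ 0)]
  have hmod : (PySem.Int.mod (d + b) b = 0) ↔ (PySem.Int.mod d b = 0) := by
    rw [PySem.Int.mod_eq_zero_iff_dvd, PySem.Int.mod_eq_zero_iff_dvd]
    constructor
    · intro h
      have h2 : b ∣ (d + b) - b := dvd_sub h (dvd_refl b)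
      simpa using h2
    · intro h; exact dvd_add h (dvd_refl b)
  unfold pvCand
  simp only []
  by_cases hc : PySem.Int.mod d b = 0
  · rw [if_pos hc, if_pos (hmod.mpr hc), hfd]; ring
  · rw [if_neg hc, if_neg (fun h => hc (hmod.mp h)), hfd]

theorem pvW_add {a b : Int} (hb : 0 < b) (d : Int) : pvW a b (d + b) = pvW a b d := by
  unfold pvW; rw [pvCand_add hb]; ring

theorem pvW_add_mul {a b : Int} (hb : 0 < b) (d : Int) : ∀ (k : Nat),
    pvW a b (d + k * b) = pvW a b d := by
  intro k
  induction k with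
  | zero => simp
  | succ k ih =>
    have : d + ((k : Int) + 1) * b = (d + k * b) + b := by ring
    rw [Nat.cast_add, Nat.cast_one, this, pvW_add hb, ih]

theorem pvCand_rep_ge {a b : Int} (hb : 0 < b) (d : Int) (k : Nat) :
    pvCand a b (d + k * b) * d ≥ pvCand a b d * (d + k * b) := by
  have hW := pvW_add_mul (a := a) hb d k
  have hc := pvCross a b d (d + k * b)
  rw [hW] at hc
  have hnn := pvW_nonneg (a := a) hb d
  have hr : 0 ≤ pvW a b d * ((k : Int) * b) :=
    mul_nonneg hnn (mul_nonneg (Int.natCast_nonneg k) hb.le)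
  nlinarith [hc, hr]

-- the hand-written Euclid loop computes the gcd
theorem pvGcd_eq_aux : ∀ (n : Nat) (x y : Int), y.natAbs ≤ n → pvGcd x y = (Int.gcd x y : Int) := by
  intro n
  induction n with
  | zero =>
    intro x y hy
    have : y = 0 := by omega
    subst this
    rw [pvGcd, dif_pos rfl, Int.abs_eq_natAbs]
    simp [Int.gcd]
  | succ n ih =>
    intro x y hy
    by_cases h0 : y = 0
    · subst h0
      rw [pvGcd, dif_pos rfl, Int.abs_eq_natAbs]
      simp [Int.gcd]
    · rw [pvGcd, dif_neg h0, ih y (PySem.Int.mod x y) (by have := pvModAbsLt x y h0; omega)]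
      have hm : PySem.Int.mod x y = x + (-(PySem.Int.floordiv x y)) * y := by
        have := PySem.Int.floordiv_mul_add_mod x y
        linarith
      rw [hm, Int.gcd_add_mul_right_right, Int.gcd_comm]

theorem pvGcd_eq (x y : Int) : pvGcd x y = (Int.gcd x y : Int) :=
  pvGcd_eq_aux y.natAbs x y le_rfl

-- b ∣ d·a exactly when the reduced denominator divides d
theorem pvDvd_transfer {a b : Int} (hb : 0 < b) (d : Int) :
    b ∣ d * a ↔ (b / (Int.gcd a b : Int)) ∣ d := by
  set G : Int := (Int.gcd a b : Int) with hGdef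
  have hGpos : 0 < G := by
    have : Int.gcd a b ≠ 0 := by
      intro h
      exact absurd (Int.gcd_eq_zero_iff.mp h).2 (by omega)
    rw [hGdef]
    exact_mod_cast Nat.pos_of_ne_zero this
  obtain ⟨a1, ha1⟩ : G ∣ a := by rw [hGdef]; exact Int.gcd_dvd_left a b
  obtain ⟨b1, hb1⟩ : G ∣ b := by rw [hGdef]; exact Int.gcd_dvd_right a b
  have hda : a / G = a1 := by
    rw [ha1]
    exact Int.mul_ediv_cancel_left _ (by omega)
  have hdb : b / G = b1 := by
    rw [hb1]
    exact Int.mul_ediv_cancel_left _ (by omega)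
  have hcop : Int.gcd a1 b1 = 1 := by
    have h := Int.gcd_div_gcd_div_gcd (i := a) (j := b) (by omega)
    rw [← hGdef] at h
    rwa [hda, hdb] at h
  rw [hdb]
  constructor
  · intro h
    have h1 : G * b1 ∣ G * (d * a1) := by
      rw [← hb1, show G * (d * a1) = d * (G * a1) by ring, ← ha1]
      exact h
    have h2 : b1 ∣ d * a1 := (mul_dvd_mul_iff_left (by omega : G ≠ 0)).mp h1
    have hco : IsCoprime b1 a1 := Int.isCoprime_iff_gcd_eq_one.mpr (by rw [Int.gcd_comm]; exact hcop)
    exact hco.dvd_of_dvd_mul_right h2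
  · intro h
    obtain ⟨e, he⟩ := h
    refine ⟨e * a1, ?_⟩
    rw [he, ha1, hb1]
    ring

-- in the increasing range, everything smaller than the split point is in the prefix
theorem pvRange_before {lo N : Int} {l1 l2 : List Int} {z x : Int}
    (hsplit : PySem.List.pyRange lo (N + 1) 1 = l1 ++ z :: l2)
    (hlo : lo ≤ x) (hxz : x < z) (hzN : z ≤ N) : x ∈ l1 := by
  have hmem : x ∈ PySem.List.pyRange lo (N + 1) 1 :=
    PySem.List.mem_pyRange_one.mpr ⟨hlo, by omega⟩
  rw [hsplit] at hmem
  rcases List.mem_append.mp hmem with h | h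
  · exact h
  · rcases List.mem_cons.mp h with h | h
    · omega
    · exfalso
      have hp := PySem.List.pairwise_lt_pyRange_one lo (N + 1)
      rw [hsplit] at hp
      have := ((List.pairwise_append.mp hp).2.1)
      have hzx := (List.pairwise_cons.mp this).1 x h
      omega

theorem pvMemRange {lo N x : Int} (h : x ∈ PySem.List.pyRange lo (N + 1) 1) :
    lo ≤ x ∧ x ≤ N := by
  have := PySem.List.mem_pyRange_one.mp h
  omega

-- ===== the main equality for positive denominator =====
theorem pvAlt_unfold (a b N : Int) (hb : 0 < b) (hN : 1 ≤ N) :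
    solution_alt a b N =
      if 1 < (Int.gcd a b : Int) ∧ PySem.Int.floordiv b (Int.gcd a b : Int) ≤ N then
        (if 0 < PySem.Int.floordiv ((PySem.Int.floordiv b (Int.gcd a b : Int)) * a) b then
           PySem.Int.floordiv ((PySem.Int.floordiv b (Int.gcd a b : Int)) * a) b else 0)
      else
        (if (pvDn (pvCand a b) (PySem.List.pyRange N ((if N - b + 1 < 1 then 1 else N - b + 1) - 1) (-1)) (0, 1)).1 ≤ 0 then 0
         else PySem.Int.floordiv
           (pvDn (pvCand a b) (PySem.List.pyRange N ((if N - b + 1 < 1 then 1 else N - b + 1) - 1) (-1)) (0, 1)).1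
           ((Int.gcd (pvDn (pvCand a b) (PySem.List.pyRange N ((if N - b + 1 < 1 then 1 else N - b + 1) - 1) (-1)) (0, 1)).1
                     (pvDn (pvCand a b) (PySem.List.pyRange N ((if N - b + 1 < 1 then 1 else N - b + 1) - 1) (-1)) (0, 1)).2 : Int))) := by
  unfold solution_alt pvDn
  rw [if_neg (by omega : ¬ N < 1)]
  simp only [abs_of_pos hb, pvGcd_eq]

theorem pvMain (a b N : Int) (hb : 0 < b) (hN : 1 ≤ N) :
    solution a b N = solution_alt a b N := by
  have hA : solution a b N = (pvUp (pvCand a b) (PySem.List.pyRange 1 (N + 1) 1) (0, 1)).1 := rfl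
  have hlpos : ∀ d ∈ PySem.List.pyRange 1 (N + 1) 1, (0 : Int) < d := by
    intro d hd
    have := PySem.List.mem_pyRange_one.mp hd
    omega
  have hlcons : PySem.List.pyRange 1 (N + 1) 1 = 1 :: PySem.List.pyRange (1 + 1) (N + 1) 1 :=
    PySem.List.pyRange_one_cons (by omega)
  obtain ⟨z, hz⟩ : ∃ z, pvFM (pvCand a b) (PySem.List.pyRange 1 (N + 1) 1) = some z := by
    rw [hlcons]
    exact pvFM_isSome 1 _
  obtain ⟨l1, l2, hsplit, hstrict, hle⟩ := pvFM_split (pvCand a b) _ hlpos hz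
  have hzl : z ∈ PySem.List.pyRange 1 (N + 1) 1 := pvFM_mem hz
  have hzb : 1 ≤ z ∧ z ≤ N := pvMemRange hzl
  rw [hA, pvUp_char (pvCand a b) _ (0, 1) hlpos (by norm_num), hz, pvAlt_unfold a b N hb hN]
  have hpick : (pvPickUp (pvCand a b) (0, 1) (some z)).1
      = if 0 < pvCand a b z then pvCand a b z else 0 := by
    simp only [pvPickUp, mul_one, mul_zero]
    by_cases h : 0 < pvCand a b z
    · rw [if_pos h, if_pos h]
    · rw [if_neg h, if_neg h]
  rw [hpick]
  have hGpos : 0 < (Int.gcd a b : Int) := by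
    have hgne : Int.gcd a b ≠ 0 := by
      intro h
      exact absurd (Int.gcd_eq_zero_iff.mp h).2 (by omega)
    exact_mod_cast Nat.pos_of_ne_zero hgne
  obtain ⟨a1, ha1⟩ : (Int.gcd a b : Int) ∣ a := Int.gcd_dvd_left a b
  obtain ⟨b1, hb1⟩ : (Int.gcd a b : Int) ∣ b := Int.gcd_dvd_right a b
  have hmpdiv : PySem.Int.floordiv b (Int.gcd a b : Int) = b / (Int.gcd a b : Int) :=
    PySem.Int.floordiv_eq_ediv_of_pos hGpos
  have hmpG : PySem.Int.floordiv b (Int.gcd a b : Int) * (Int.gcd a b : Int) = b := by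
    rw [hmpdiv]
    exact Int.ediv_mul_cancel ⟨b1, hb1⟩
  have hmp1 : 1 ≤ PySem.Int.floordiv b (Int.gcd a b : Int) := by
    nlinarith [hmpG, hGpos, hb]
  by_cases hbr : 1 < (Int.gcd a b : Int) ∧ PySem.Int.floordiv b (Int.gcd a b : Int) ≤ N
  · -- exact-hit case: the first maximum is the reduced denominator
    rw [if_pos hbr]
    have hmplt : PySem.Int.floordiv b (Int.gcd a b : Int) < b := by nlinarith [hmpG, hbr.1, hmp1]
    have hmpb : ¬ b ∣ PySem.Int.floordiv b (Int.gcd a b : Int) := by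
      intro hdvd
      have := Int.le_of_dvd (by omega) hdvd
      omega
    have hmpa : b ∣ PySem.Int.floordiv b (Int.gcd a b : Int) * a := by
      refine ⟨a1, ?_⟩
      calc PySem.Int.floordiv b (Int.gcd a b : Int) * a
          = PySem.Int.floordiv b (Int.gcd a b : Int) * ((Int.gcd a b : Int) * a1) := by
            rw [← ha1]
        _ = (PySem.Int.floordiv b (Int.gcd a b : Int) * (Int.gcd a b : Int)) * a1 := by ring
        _ = b * a1 := by rw [hmpG]
    have hWmp : pvW a b (PySem.Int.floordiv b (Int.gcd a b : Int)) = 0 :=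
      (pvW_zero_iff hb _).mpr ⟨hmpb, hmpa⟩
    have hmpl : PySem.Int.floordiv b (Int.gcd a b : Int) ∈ PySem.List.pyRange 1 (N + 1) 1 :=
      PySem.List.mem_pyRange_one.mpr ⟨hmp1, by omega⟩
    have hzmp : z = PySem.Int.floordiv b (Int.gcd a b : Int) := by
      rw [hsplit] at hmpl
      rcases List.mem_append.mp hmpl with h1 | h1
      · exfalso
        have hst := hstrict _ h1
        have htr := (pvTransfer_lt hb (PySem.Int.floordiv b (Int.gcd a b : Int)) z).mp (by linarith)
        rw [hWmp] at htr
        have hnn := pvW_nonneg (a := a) hb z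
        nlinarith
      · rcases List.mem_cons.mp h1 with h1 | h1
        · exact h1.symm
        · exfalso
          have hle2 := hle _ h1
          have htr := (pvTransfer_le hb (PySem.Int.floordiv b (Int.gcd a b : Int)) z).mp (by linarith)
          rw [hWmp] at htr
          have hWz0 : pvW a b z = 0 := by nlinarith [pvW_nonneg (a := a) hb z, hmp1]
          obtain ⟨hbz, hbza⟩ := (pvW_zero_iff hb z).mp hWz0
          have hmpz : (b / (Int.gcd a b : Int)) ∣ z := (pvDvd_transfer hb z).mp hbza
          rw [← hmpdiv] at hmpz
          have hlez : PySem.Int.floordiv b (Int.gcd a b : Int) ≤ z := Int.le_of_dvd (by omega) hmpz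
          have hp := PySem.List.pairwise_lt_pyRange_one 1 (N + 1)
          rw [hsplit] at hp
          have hzx := (List.pairwise_cons.mp (List.pairwise_append.mp hp).2.1).1 _ h1
          omega
    have hvmp : pvCand a b (PySem.Int.floordiv b (Int.gcd a b : Int))
        = PySem.Int.floordiv (PySem.Int.floordiv b (Int.gcd a b : Int) * a) b := by
      unfold pvCand
      rw [if_neg (fun h => hmpb ((PySem.Int.mod_eq_zero_iff_dvd _ _).mp h))]
    rw [hzmp, hvmp]
  · -- generic case: window scan plus gcd reduction
    rw [if_neg hbr]
    have hW1 : ∀ d ∈ PySem.List.pyRange 1 (N + 1) 1, 1 ≤ pvW a b d := by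
      intro d hd
      have hdbd := pvMemRange hd
      have hdpos := hlpos d hd
      have hnn := pvW_nonneg (a := a) hb d
      rcases eq_or_lt_of_le hnn with h0 | h1
      · exfalso
        obtain ⟨hbd, hbda⟩ := (pvW_zero_iff hb d).mp h0.symm
        have hmpd : (b / (Int.gcd a b : Int)) ∣ d := (pvDvd_transfer hb d).mp hbda
        rw [← hmpdiv] at hmpd
        have hG1 : 1 < (Int.gcd a b : Int) := by
          by_contra hG1
          have hGe : (Int.gcd a b : Int) = 1 := by omega
          rw [hGe] at hmpd
          have : b ∣ d := by
            rwa [PySem.Int.floordiv_eq_ediv_of_pos one_pos, Int.ediv_one] at hmpd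
          exact hbd this
        have hled : PySem.Int.floordiv b (Int.gcd a b : Int) ≤ d := Int.le_of_dvd hdpos hmpd
        exact hbr ⟨hG1, by omega⟩
      · omega
    have hwpos : ∀ d ∈ PySem.List.pyRange (if N - b + 1 < 1 then 1 else N - b + 1) (N + 1) 1, (0 : Int) < d := by
      intro d hd
      have := PySem.List.mem_pyRange_one.mp hd
      split_ifs at this <;> omega
    have hrev : PySem.List.pyRange N ((if N - b + 1 < 1 then 1 else N - b + 1) - 1) (-1)
        = (PySem.List.pyRange (if N - b + 1 < 1 then 1 else N - b + 1) (N + 1) 1).reverse := by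
      have h := PySem.List.pyRange_neg_one_eq_reverse N ((if N - b + 1 < 1 then 1 else N - b + 1) - 1)
      simpa using h
    have hwpos' : ∀ d ∈ (PySem.List.pyRange (if N - b + 1 < 1 then 1 else N - b + 1) (N + 1) 1).reverse, (0 : Int) < d := by
      intro d hd
      exact hwpos d (List.mem_reverse.mp hd)
    obtain ⟨z2, hz2⟩ : ∃ z2, pvLM (pvCand a b) ((PySem.List.pyRange (if N - b + 1 < 1 then 1 else N - b + 1) (N + 1) 1).reverse) = some z2 := by
      rw [show (PySem.List.pyRange (if N - b + 1 < 1 then 1 else N - b + 1) (N + 1) 1) = _ from PySem.List.pyRange_one_cons (by split_ifs <;> omega), List.reverse_cons]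
      rcases hcase : (PySem.List.pyRange ((if N - b + 1 < 1 then 1 else N - b + 1) + 1) (N + 1) 1).reverse with _ | ⟨y, u⟩
      · simp only [List.nil_append]
        exact pvLM_isSome _ _
      · simp only [List.cons_append]
        exact pvLM_isSome _ _
    have hz2w : z2 ∈ PySem.List.pyRange (if N - b + 1 < 1 then 1 else N - b + 1) (N + 1) 1 :=
      List.mem_reverse.mp (pvLM_mem hz2)
    have hwmax : ∀ x ∈ PySem.List.pyRange (if N - b + 1 < 1 then 1 else N - b + 1) (N + 1) 1,
        pvCand a b x * z2 ≤ pvCand a b z2 * x := by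
      intro x hx
      exact pvLM_max (pvCand a b) _ hwpos' hz2 x (List.mem_reverse.mpr hx)
    have hz2b := pvMemRange hz2w
    have hz2pos : 0 < z2 := hwpos _ hz2w
    have hz2leN : z2 ≤ N := hz2b.2
    rw [hrev, pvDn_char (pvCand a b) _ (0, 1) hwpos' (by norm_num), hz2]
    -- (a) the window winner is globally no better than z
    have hca : pvCand a b z2 * z ≤ pvCand a b z * z2 := by
      have hz2l : z2 ∈ PySem.List.pyRange 1 (N + 1) 1 :=
        PySem.List.mem_pyRange_one.mpr ⟨by omega, by omega⟩
      rw [hsplit] at hz2l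
      rcases List.mem_append.mp hz2l with h1 | h1
      · exact le_of_lt (hstrict _ h1)
      · rcases List.mem_cons.mp h1 with h1 | h1
        · rw [h1]
        · exact hle _ h1
    -- (b) z has a representative of its residue class inside the window
    have hk0 : 0 ≤ (N - z) / b := Int.ediv_nonneg (by omega) hb.le
    have hdm := Int.ediv_add_emod (N - z) b
    have hm0 := Int.emod_nonneg (N - z) (by omega : b ≠ 0)
    have hm1 := Int.emod_lt_of_pos (N - z) hb
    have hkcast : ((((N - z) / b).toNat : Int)) = (N - z) / b := Int.toNat_of_nonneg hk0
    have hcomm : ((N - z) / b) * b = b * ((N - z) / b) := mul_comm _ _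
    set r := z + (((N - z) / b).toNat : Int) * b with hr
    have hreq : r = z + ((N - z) / b) * b := by rw [hr, hkcast]
    have hrleN : r ≤ N := by
      have h1 : b * ((N - z) / b) ≤ N - z := by linarith
      linarith [hreq, hcomm]
    have hzler : z ≤ r := by
      have h1 : 0 ≤ ((N - z) / b) * b := mul_nonneg hk0 hb.le
      linarith [hreq]
    have hrgeNb : N - b + 1 ≤ r := by
      have h1 : N - z < b * ((N - z) / b) + b := by linarith
      linarith [hreq, hcomm]
    have hrwl : r ∈ PySem.List.pyRange (if N - b + 1 < 1 then 1 else N - b + 1) (N + 1) 1 := by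
      refine PySem.List.mem_pyRange_one.mpr ⟨?_, by omega⟩
      split_ifs <;> omega
    have hvr : pvCand a b r * z ≥ pvCand a b z * r := by
      have h := pvCand_rep_ge (a := a) hb z ((N - z) / b).toNat
      rwa [← hr] at h
    have hWr : pvW a b r = pvW a b z := by
      have h := pvW_add_mul (a := a) hb z ((N - z) / b).toNat
      rwa [← hr] at h
    -- r is no better than the window winner
    have hcb : pvCand a b r * z2 ≤ pvCand a b z2 * r := hwmax r hrwl
    -- combine to equal fractions
    have ht1 := (pvTransfer_le hb r z2).mp (by linarith)
    rw [hWr] at ht1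
    have ht2 : pvW a b z2 * z ≤ pvW a b z2 * r :=
      mul_le_mul_of_nonneg_left hzler (pvW_nonneg (a := a) hb z2)
    have ht3 := (pvTransfer_le hb z2 z).mp (by linarith [hca])
    have hWeq : pvW a b z2 * z = pvW a b z * z2 := le_antisymm (by linarith) (by linarith)
    have hcross := pvCross a b z z2
    have hfrac : pvCand a b z2 * z = pvCand a b z * z2 := by
      have h0 : b * (pvCand a b z2 * z - pvCand a b z * z2) = 0 := by linarith [hWeq]
      rcases mul_eq_zero.mp h0 with h | h
      · omega
      · linarith
    -- (c) the first global maximum is in lowest terms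
    have hcop : Int.gcd (pvCand a b z) z = 1 := by
      by_contra hne
      have hg2ne : Int.gcd (pvCand a b z) z ≠ 0 := by
        intro h
        have := (Int.gcd_eq_zero_iff.mp h).2
        omega
      have hg2 : 2 ≤ (Int.gcd (pvCand a b z) z : Int) := by
        have h2 : 2 ≤ Int.gcd (pvCand a b z) z := by omega
        exact_mod_cast h2
      obtain ⟨q, hq⟩ : (Int.gcd (pvCand a b z) z : Int) ∣ z := Int.gcd_dvd_right _ _
      obtain ⟨p, hp⟩ : (Int.gcd (pvCand a b z) z : Int) ∣ pvCand a b z := Int.gcd_dvd_left _ _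
      obtain ⟨g2, hg2def⟩ : ∃ g2 : Int, g2 = (Int.gcd (pvCand a b z) z : Int) := ⟨_, rfl⟩
      rw [← hg2def] at hq hp hg2
      have hq1 : 1 ≤ q := by nlinarith [hq, hg2, hzb.1]
      have hqz : q < z := by nlinarith [hq, hg2, hq1]
      have hWz := hW1 z hzl
      have hWdef : pvW a b z = z * a - b * pvCand a b z := rfl
      have hkey : b * p < q * a := by
        have h1 : b * pvCand a b z < z * a := by linarith [hWz, hWdef]
        have h2 : (b * p) * g2 < (q * a) * g2 := by
          rw [hp] at h1
          nth_rewrite 1 [hq] at h1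
          nlinarith [h1]
        exact lt_of_mul_lt_mul_right h2 (by linarith)
      have hql : q ∈ PySem.List.pyRange 1 (N + 1) 1 :=
        PySem.List.mem_pyRange_one.mpr ⟨hq1, by omega⟩
      have hpq : p ≤ pvCand a b q := by
        by_cases hbq : b ∣ q
        · have hvq : pvCand a b q = PySem.Int.floordiv (q * a) b - 1 := by
            unfold pvCand
            rw [if_pos ((PySem.Int.mod_eq_zero_iff_dvd q b).mpr hbq)]
          have hmz : PySem.Int.mod (q * a) b = 0 :=
            (PySem.Int.mod_eq_zero_iff_dvd _ _).mpr (hbq.mul_right a)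
          have hex := PySem.Int.floordiv_mul_add_mod (q * a) b
          rw [hmz, add_zero] at hex
          have hplt : p < PySem.Int.floordiv (q * a) b := by nlinarith [hkey, hex]
          rw [hvq]
          omega
        · by_cases hbqa : b ∣ q * a
          · exfalso
            have h0 : pvW a b q = 0 := (pvW_zero_iff hb q).mpr ⟨hbq, hbqa⟩
            have := hW1 q hql
            omega
          · have hvq : pvCand a b q = PySem.Int.floordiv (q * a) b := by
              unfold pvCand
              rw [if_neg (fun h => hbq ((PySem.Int.mod_eq_zero_iff_dvd q b).mp h))]
            rw [hvq]
            exact (PySem.Int.le_floordiv_iff_mul_le hb).mpr (by nlinarith [hkey])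
      have hql1 : q ∈ l1 := pvRange_before hsplit hq1 hqz hzb.2
      have hst := hstrict q hql1
      have h5 : p * z ≤ pvCand a b q * z := mul_le_mul_of_nonneg_right hpq (by omega)
      have h6 : p * z = pvCand a b z * q := by
        rw [hp]
        nth_rewrite 1 [hq]
        ring
      linarith [hst, h5, h6]
    -- (d) reduce the window winner back to z's value
    have hz0 : z ≠ 0 := by omega
    have hdvdz : z ∣ z2 := by
      have h1 : z ∣ z2 * pvCand a b z := by
        have he : z2 * pvCand a b z = pvCand a b z2 * z := by linarith [hfrac]
        rw [he]
        exact dvd_mul_left z (pvCand a b z2)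
      have hco : IsCoprime z (pvCand a b z) :=
        Int.isCoprime_iff_gcd_eq_one.mpr (by rw [Int.gcd_comm]; exact hcop)
      exact hco.dvd_of_dvd_mul_right h1
    obtain ⟨kk, hkk⟩ := hdvdz
    have hkpos : 0 < kk := by nlinarith [hkk, hz2pos, hzb.1]
    have hvz2 : pvCand a b z2 = pvCand a b z * kk := by
      have h1 : pvCand a b z2 * z = (pvCand a b z * kk) * z := by
        calc pvCand a b z2 * z = pvCand a b z * z2 := hfrac
          _ = pvCand a b z * (z * kk) := by rw [← hkk]
          _ = (pvCand a b z * kk) * z := by ring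
      exact mul_right_cancel₀ hz0 h1
    have hgz2 : (Int.gcd (pvCand a b z2) z2 : Int) = kk := by
      rw [hvz2, hkk, Int.gcd_mul_right, hcop]
      simp [Int.natAbs_of_nonneg hkpos.le]
    -- final comparison
    simp only [pvPickDn, mul_one, zero_mul]
    by_cases hpos : 0 < pvCand a b z
    · have hpos2 : 0 < pvCand a b z2 := by
        rw [hvz2]
        exact mul_pos hpos hkpos
      rw [if_pos hpos, if_pos (le_of_lt hpos2), if_neg (by simp; omega)]
      simp only []
      rw [hgz2, hvz2, PySem.Int.floordiv_eq_ediv_of_pos hkpos,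
          Int.mul_ediv_cancel _ (ne_of_gt hkpos)]
    · have hnp2 : pvCand a b z2 ≤ 0 := by
        rw [hvz2]
        by_contra h
        apply hpos
        nlinarith [hkpos]
      rw [if_neg hpos]
      by_cases h0 : (0 : Int) ≤ pvCand a b z2
      · rw [if_pos h0, if_pos (by simpa using hnp2)]
      · rw [if_neg h0, if_pos (by norm_num)]

-- symmetry in the signs of numerator and denominator
theorem pvCand_neg (a b d : Int) : pvCand a b d = pvCand (-a) (-b) d := by
  unfold pvCand
  have h1 : PySem.Int.floordiv (d * -a) (-b) = PySem.Int.floordiv (d * a) b := by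
    rw [show d * -a = -(d * a) by ring, PySem.Int.floordiv_neg_neg]
  have h2 : (PySem.Int.mod d (-b) = 0) ↔ (PySem.Int.mod d b = 0) := by
    rw [PySem.Int.mod_eq_zero_iff_dvd, PySem.Int.mod_eq_zero_iff_dvd, neg_dvd]
  simp only [h1]
  rw [if_congr h2.symm rfl rfl]

theorem pvSolution_neg (a b N : Int) : solution a b N = solution (-a) (-b) N := by
  unfold solution
  have hf : (fun (s : Int × Int) d =>
      let c := pvCand a b d
      if c * s.2 > d * s.1 then (c, d) else s)
      = (fun (s : Int × Int) d =>
      let c := pvCand (-a) (-b) d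
      if c * s.2 > d * s.1 then (c, d) else s) := by
    funext s d
    simp only [pvCand_neg a b d]
  rw [hf]

theorem pvSolutionAlt_neg (a b N : Int) : solution_alt a b N = solution_alt (-a) (-b) N := by
  unfold solution_alt
  by_cases hN : N < 1
  · rw [if_pos hN, if_pos hN]
  · rw [if_neg hN, if_neg hN]
    have habs : |(-b)| = |b| := abs_neg b
    have hg : pvGcd (-a) |b| = pvGcd a |b| := by
      rw [pvGcd_eq, pvGcd_eq, Int.neg_gcd]
    have hval : ∀ mp : Int, PySem.Int.floordiv (mp * -a) (-b) = PySem.Int.floordiv (mp * a) b := by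
      intro mp
      rw [show mp * -a = -(mp * a) by ring, PySem.Int.floordiv_neg_neg]
    have hf : (fun (s : Int × Int) d =>
        let c := pvCand (-a) (-b) d
        if c * s.2 ≥ s.1 * d then (c, d) else s)
        = (fun (s : Int × Int) d =>
        let c := pvCand a b d
        if c * s.2 ≥ s.1 * d then (c, d) else s) := by
      funext s d
      simp only [← pvCand_neg a b d]
    simp only [habs, hg, hval, hf]

theorem pvSolution_eq (a b N : Int) (hpre : b ≠ 0 ∨ N < 1) :
    solution a b N = solution_alt a b N := by
  by_cases hN : N < 1
  · have hA : solution a b N = 0 := by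
      unfold solution
      rw [PySem.List.pyRange_one_eq_nil (by omega : N + 1 ≤ 1)]
      rfl
    have hB : solution_alt a b N = 0 := by
      unfold solution_alt
      rw [if_pos hN]
    rw [hA, hB]
  · have hb : b ≠ 0 := by tauto
    have hN1 : 1 ≤ N := by omega
    rcases lt_or_gt_of_ne hb with hneg | hpos
    · rw [pvSolution_neg, pvSolutionAlt_neg]
      exact pvMain (-a) (-b) N (by omega) hN1
    · exact pvMain a b N hpos hN1

-- ===== VERDICT (by name: the statement is the Claim_ definition above) =====
theorem solution_spec : Claim_equal_solution := by
  intro numerator denominator limit _ hpre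
  unfold Spec_solution
  exact pvSolution_eq numerator denominator limit hpre
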